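-- pv_equiv track=rewrite | github.com/Kimtaehan2/Baekjoon | 백준/Gold/2448. 별 찍기 － 11/별 찍기 － 11.py | semo
-- ===== SOURCE A (Python) =====
-- def semo(n):
--     if n <= 3:
--         return ['  *  ',' * * ','*****']
--
--     arr = semo(n//2)
--     semo_copy = []
--
--     for i in arr:
--         semo_copy.append(' '*(n//2)+i+' '*(n//2))
--
--     for i in arr:
--         semo_copy.append(i+' '+i)
--
--     return semo_copy
-- ===== SOURCE B (Python) =====
-- def semo(n):
--     block = ['  *  ', ' * * ', '*****']
--     levels = []
--     m = n
--     while m > 3: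
--         levels.append(m)
--         m //= 2
--     for m in reversed(levels):
--         pad = ' ' * (m // 2)
--         block = [pad + row + pad for row in block] + [row + ' ' + row for row in block]
--     return block
-- ===== Notes on version B (the rewrite author's own statement) =====
-- stated objective: alternative
-- what changed: Replaces the recursion with an explicit iteration: first collect the chain of n values by repeated halving, then rebuild the block bottom-up with list comprehensions, innermost level first.
import Mathlib
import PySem

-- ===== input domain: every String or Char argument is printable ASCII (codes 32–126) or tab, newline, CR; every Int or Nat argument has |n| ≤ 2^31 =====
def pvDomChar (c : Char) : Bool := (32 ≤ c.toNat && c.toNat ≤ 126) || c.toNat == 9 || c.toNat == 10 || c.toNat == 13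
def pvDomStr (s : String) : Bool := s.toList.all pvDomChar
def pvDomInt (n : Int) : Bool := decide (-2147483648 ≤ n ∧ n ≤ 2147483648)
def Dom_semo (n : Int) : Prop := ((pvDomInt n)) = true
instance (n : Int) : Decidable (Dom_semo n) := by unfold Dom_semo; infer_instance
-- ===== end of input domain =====

-- B replaces the recursion by an iteration: collect the halving chain of n, then rebuild the
-- block innermost-first with comprehensions (alternative decomposition, same cost).

-- ===== PORT A =====
-- A's pad string ' '*(n//2) ( '*' with a negative count is '' — toNat clamps the same way)
def semoPad (n : Int) : String := String.ofList (List.replicate (PySem.Int.floordiv n 2).toNat ' ')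

def semo (n : Int) : List String :=
  if n ≤ 3 then ["  *  ", " * * ", "*****"]
  else
    let arr := semo (PySem.Int.floordiv n 2)
    let c1 := arr.foldl (fun acc i => acc ++ [semoPad n ++ i ++ semoPad n]) []
    arr.foldl (fun acc i => acc ++ [i ++ " " ++ i]) c1
termination_by n.toNat
decreasing_by
  rw [PySem.Int.floordiv_eq_ediv_of_pos (by omega)]
  omega

-- ===== PORT B =====
-- the chain of n values the while loop collects (append order)
def semoLevels (m : Int) : List Int :=
  if m ≤ 3 then [] else m :: semoLevels (PySem.Int.floordiv m 2)
termination_by m.toNat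
decreasing_by
  rw [PySem.Int.floordiv_eq_ediv_of_pos (by omega)]
  omega

-- one step of B's loop body (the two comprehensions)
def semoStep (m : Int) (block : List String) : List String :=
  (block.map fun row => semoPad m ++ row ++ semoPad m) ++
  (block.map fun row => row ++ " " ++ row)

-- iterating over reversed(levels) is a right fold over levels
def semo_alt (n : Int) : List String :=
  (semoLevels n).foldr semoStep ["  *  ", " * * ", "*****"]

-- ===== PRECONDITION & SPEC =====
def Spec_semo (n : Int) (out : List String) : Prop := out = semo_alt n
instance (n : Int) (out : List String) : Decidable (Spec_semo n out) := by unfold Spec_semo; infer_instance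

-- ===== CLAIM (what is proved, stated in full; the proofs are below) =====
def Claim_equal_semo : Prop := ∀ (n : Int), Dom_semo n → Spec_semo n (semo n)

-- ===== LEMMAS AND PROOFS =====
theorem foldl_append_map {α β : Type} (f : α → β) (l : List α) (init : List β) :
    l.foldl (fun acc i => acc ++ [f i]) init = init ++ l.map f := by
  induction l generalizing init with
  | nil => simp
  | cons x xs ih => simp [List.foldl, ih]

theorem semo_eq_alt (n : Int) : semo n = semo_alt n := by
  rw [semo_alt]
  induction n using semo.induct with
  | case1 n h => rw [semo, semoLevels]; simp [h]
  | case2 n h ih =>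
    rw [semo, semoLevels]
    simp only [h, if_false, List.foldr_cons]
    rw [foldl_append_map, foldl_append_map, ih, semoStep, List.nil_append]

-- ===== VERDICT (by name: the statement is the Claim_ definition above) =====
theorem semo_spec : Claim_equal_semo := by
  intro n _
  unfold Spec_semo
  exact semo_eq_alt n
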